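-- pv_equiv track=rewrite | github.com/LakshyaG42/MovieRecommendationSystem | hw1.py | create_genre_dict
-- ===== SOURCE A (Python) =====
-- def create_genre_dict(d):
--     # parameter d: dictionary that maps movie to genre
--     # return: dictionary that maps genre to movies
--     # WRITE YOUR CODE BELOW
--     genreDict = {}
--     for key, value in d.items():
--         if(value in genreDict.keys()):
--             genreDict[value].append(key)
--         else:
--             genreDict[value] = [key]
--
--     return genreDict
--     pass
-- ===== SOURCE B (Python) =====
-- def create_genre_dict(d):
--     # Distinct genres (insertion order), then one filter pass per genre.
--     return {g: [m for m, gg in d.items() if gg == g] for g in dict.fromkeys(d.values())}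
-- ===== Notes on version B (the rewrite author's own statement) =====
-- stated objective: alternative
-- what changed: Replaces the single accumulating pass with mutable per-genre lists by first collecting the distinct genres (dict.fromkeys) and then building each genre's movie list with an independent filter over the items.
import Mathlib
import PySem

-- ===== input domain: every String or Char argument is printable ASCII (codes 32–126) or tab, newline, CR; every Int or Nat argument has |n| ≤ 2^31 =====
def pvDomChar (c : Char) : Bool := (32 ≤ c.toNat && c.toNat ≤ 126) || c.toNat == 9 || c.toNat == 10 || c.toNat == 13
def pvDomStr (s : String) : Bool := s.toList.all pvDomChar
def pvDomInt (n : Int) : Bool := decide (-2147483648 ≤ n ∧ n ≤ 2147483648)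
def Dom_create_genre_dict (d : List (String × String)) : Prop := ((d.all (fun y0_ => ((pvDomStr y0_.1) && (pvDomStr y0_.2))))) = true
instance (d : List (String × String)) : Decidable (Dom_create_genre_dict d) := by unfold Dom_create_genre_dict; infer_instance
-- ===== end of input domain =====

-- B inverts the dict by collecting the distinct genres first and filtering the items once per genre,
-- instead of A's single accumulating pass; objective: alternative (same result, different traversal).

-- ===== PORT A =====
-- genreDict[value].append(key): update the (unique) entry for `value` in the association list.
def pvAppendAt (g : List (String × List String)) (v k : String) : List (String × List String) :=
  match g with
  | [] => []
  | e :: rest => if e.1 == v then (e.1, e.2 ++ [k]) :: rest else e :: pvAppendAt rest v k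

def create_genre_dict (d : List (String × String)) : List (String × List String) :=
  d.foldl (fun genreDict kv =>
    if (genreDict.map Prod.fst).contains kv.2 then pvAppendAt genreDict kv.2 kv.1
    else genreDict ++ [(kv.2, [kv.1])]) []

-- ===== PORT B =====
def create_genre_dict_alt (d : List (String × String)) : List (String × List String) :=
  (PySem.List.dedup (d.map Prod.snd)).map
    (fun g => (g, (d.filter (fun kv => kv.2 == g)).map Prod.fst))

-- ===== PRECONDITION & SPEC =====
def Spec_create_genre_dict (d : List (String × String)) (out : List (String × List String)) : Prop := out = create_genre_dict_alt d
instance (d : List (String × String)) (out : List (String × List String)) : Decidable (Spec_create_genre_dict d out) := by unfold Spec_create_genre_dict; infer_instance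

-- ===== CLAIM (what is proved, stated in full; the proofs are below) =====
def Claim_equal_create_genre_dict : Prop := ∀ (d : List (String × String)), Dom_create_genre_dict d → Spec_create_genre_dict d (create_genre_dict d)

-- ===== LEMMAS AND PROOFS =====

theorem dedup_append_singleton (xs : List String) (x : String) :
    PySem.List.dedup (xs ++ [x]) =
      if x ∈ PySem.List.dedup xs then PySem.List.dedup xs else PySem.List.dedup xs ++ [x] := by
  simp [PySem.List.dedup, PySem.Set.ofList, List.foldl_append, PySem.Set.add]

-- pvAppendAt on a keyed map: with distinct keys, appending at `v` is a pointwise update.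
theorem pvAppendAt_map (gs : List String) (f : String → List String) (v k : String)
    (hnd : gs.Nodup) (hv : v ∈ gs) :
    pvAppendAt (gs.map (fun g => (g, f g))) v k =
      gs.map (fun g => (g, f g ++ if v == g then [k] else [])) := by
  induction gs with
  | nil => cases hv
  | cons a rest ih =>
    simp only [List.map_cons, pvAppendAt]
    by_cases hav : a = v
    · subst hav
      simp only [beq_self_eq_true, if_pos]
      refine congrArg₂ _ rfl ?_
      apply List.map_congr_left
      intro g hg
      have : a ≠ g := fun h => (List.nodup_cons.mp hnd).1 (h ▸ hg)
      simp [beq_eq_false_iff_ne.mpr this]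
    · have hva : v ∈ rest := by
        rcases List.mem_cons.mp hv with h | h
        · exact absurd h.symm hav
        · exact h
      rw [if_neg (by simp [hav]), ih (List.nodup_cons.mp hnd).2 hva]
      simp [beq_eq_false_iff_ne.mpr (fun h => hav h.symm)]

-- One step of A's loop, expressed on the B-side characterisation of the partial result.
theorem step_eq (p : List (String × String)) (k v : String) :
    (if ((create_genre_dict_alt p).map Prod.fst).contains v
       then pvAppendAt (create_genre_dict_alt p) v k
       else create_genre_dict_alt p ++ [(v, [k])]) =
      create_genre_dict_alt (p ++ [(k, v)]) := by
  have hkeys : (create_genre_dict_alt p).map Prod.fst = PySem.List.dedup (p.map Prod.snd) := by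
    simp [create_genre_dict_alt, List.map_map, Function.comp_def]
  have hmemd : ∀ x : String, x ∈ PySem.List.dedup (p.map Prod.snd) ↔ x ∈ p.map Prod.snd :=
    fun x => PySem.List.mem_dedup _ x
  by_cases hv : v ∈ PySem.List.dedup (p.map Prod.snd)
  · rw [if_pos (by simpa [hkeys] using hv)]
    unfold create_genre_dict_alt
    simp only [List.map_append, List.map_cons, List.map_nil]
    rw [dedup_append_singleton, if_pos hv,
      pvAppendAt_map _ _ _ _ (PySem.List.nodup_dedup _) hv]
    apply List.map_congr_left
    intro g _
    simp only [List.filter_append, List.map_append]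
    by_cases hgv : v = g
    · subst hgv; simp [List.filter]
    · simp [List.filter, beq_eq_false_iff_ne.mpr hgv]
  · rw [if_neg (by simpa [hkeys] using hv)]
    unfold create_genre_dict_alt
    simp only [List.map_append, List.map_cons, List.map_nil]
    rw [dedup_append_singleton, if_neg hv]
    simp only [List.map_append, List.map_cons, List.map_nil]
    refine congrArg₂ (· ++ ·) ?_ ?_
    · apply List.map_congr_left
      intro g hg
      have hgv : v ≠ g := fun h => hv (h ▸ hg)
      simp [List.filter_append, List.filter, beq_eq_false_iff_ne.mpr hgv]
    · have hvp : v ∉ p.map Prod.snd := fun h => hv ((hmemd v).mpr h)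
      have : p.filter (fun kv => kv.2 == v) = [] := by
        rw [List.filter_eq_nil_iff]
        intro kv hkv hbeq
        exact hvp (List.mem_map.mpr ⟨kv, hkv, eq_of_beq hbeq⟩)
      simp [List.filter_append, List.filter, this]

-- A's fold, started from the B-form of any processed prefix, computes the B-form of the whole list.
theorem fold_inv (d p : List (String × String)) :
    d.foldl (fun genreDict kv =>
      if (genreDict.map Prod.fst).contains kv.2 then pvAppendAt genreDict kv.2 kv.1
      else genreDict ++ [(kv.2, [kv.1])]) (create_genre_dict_alt p) =
    create_genre_dict_alt (p ++ d) := by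
  induction d generalizing p with
  | nil => simp
  | cons kv rest ih =>
    rw [List.foldl_cons, step_eq p kv.1 kv.2, ih (p ++ [(kv.1, kv.2)])]
    simp

-- ===== VERDICT (by name: the statement is the Claim_ definition above) =====
theorem create_genre_dict_spec : Claim_equal_create_genre_dict := by
  intro d _
  unfold Spec_create_genre_dict create_genre_dict
  have h := fold_inv d []
  have h0 : create_genre_dict_alt [] = [] := by
    simp [create_genre_dict_alt, PySem.List.dedup, PySem.Set.ofList]
  rw [h0, List.nil_append] at h
  exact h
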